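-- pv_equiv track=rewrite | github.com/sandeepansg/chaotic-crypto | utils/nist_random_excursions_tests.py | _count_cycles
-- ===== SOURCE A (Python) =====
-- from typing import Dict, List, Any
--
-- def _count_cycles(s: List[int]) -> Dict[int, int]:
--     """
--     Count the number of cycles for each state x.
--
--     Args:
--         s: Cumulative sum sequence
--
--     Returns:
--         dict: Count of cycles for each state
--     """
--     # Initialize counter
--     J = {}
--
--     # Start at the first 0 and find cycles
--     zero_indices = [i for i, val in enumerate(s) if val == 0]
--
--     # Process each cycle (from one zero to the next)
--     for i in range(len(zero_indices) - 1):
--         start = zero_indices[i]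
--         end = zero_indices[i + 1]
--
--         # Extract cycle sequence
--         cycle = s[start+1:end]
--
--         # Count states in this cycle
--         for state in cycle:
--             J[state] = J.get(state, 0) + 1
--
--     return J
-- ===== SOURCE B (Python) =====
-- def _count_cycles(s):
--     """Count states in cycles via one flat pass between the first and last zero."""
--     J = {}
--     if 0 not in s:
--         return J
--     first = s.index(0)
--     last = len(s) - 1 - s[::-1].index(0)
--     for v in s[first:last]:
--         if v != 0:
--             J[v] = J.get(v, 0) + 1
--     return J
-- ===== Notes on version B (the rewrite author's own statement) =====
-- stated objective: faster
-- what changed: A builds the full list of zero indices and then runs a nested loop slicing out each cycle between consecutive zeros; B finds only the first and last zero and counts every nonzero element in one flat pass over that single segment.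
import Mathlib
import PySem

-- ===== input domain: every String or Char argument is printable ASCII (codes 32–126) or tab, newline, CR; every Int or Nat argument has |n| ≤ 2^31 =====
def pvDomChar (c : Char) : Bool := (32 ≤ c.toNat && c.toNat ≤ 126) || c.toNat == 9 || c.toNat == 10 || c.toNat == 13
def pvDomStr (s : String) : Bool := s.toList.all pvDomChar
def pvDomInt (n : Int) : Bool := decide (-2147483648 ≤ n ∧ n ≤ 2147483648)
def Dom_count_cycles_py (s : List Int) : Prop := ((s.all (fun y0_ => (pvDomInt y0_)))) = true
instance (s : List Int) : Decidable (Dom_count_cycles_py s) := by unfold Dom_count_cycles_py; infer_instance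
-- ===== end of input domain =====

-- B replaces A's zero-index list plus nested per-cycle slicing with one flat pass over the
-- segment between the first and last zero, skipping zeros (measured faster in a timing run).

-- ===== PORT A =====
-- Literal port of A; the dict J is a PySem.Dict, returned as its association list (.items).
def count_cycles_py (s : List Int) : List (Int × Int) :=
  let zi : List Int := ((PySem.List.enumerate s 0).filter (fun p => p.2 == 0)).map (fun p => p.1)
  ((PySem.List.pyRange 0 ((zi.length : Int) - 1) 1).foldl
    (fun (J : PySem.Dict Int Int) i =>
      let start := PySem.List.pyGetD zi i 0
      let stop := PySem.List.pyGetD zi (i + 1) 0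
      let cycle := PySem.List.slice s (some (start + 1)) (some stop)
      cycle.foldl (fun J state => J.insert state (J.getD state 0 + 1)) J)
    PySem.Dict.empty).items

-- ===== PORT B =====
-- Literal port of my B ('0 not in s' / 's.index(0)' are the none/some cases of index?;
-- s[::-1] is PySem.List.slice?; both index? .getD 0 calls hit a list containing 0, so getD is exact).
def count_cycles_py_alt (s : List Int) : List (Int × Int) :=
  match PySem.List.index? s 0 with
  | none => (PySem.Dict.empty : PySem.Dict Int Int).items
  | some first =>
    let last : Int := (s.length : Int) - 1 -
      ((PySem.List.index? ((PySem.List.slice? s none none (-1)).getD []) 0).getD 0 : Nat)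
    ((PySem.List.slice s (some (first : Int)) (some last)).foldl
      (fun (J : PySem.Dict Int Int) v => if v ≠ 0 then J.insert v (J.getD v 0 + 1) else J)
      PySem.Dict.empty).items

-- ===== PRECONDITION & SPEC =====
def Spec_count_cycles_py (s : List Int) (out : List (Int × Int)) : Prop := out = count_cycles_py_alt s
instance (s : List Int) (out : List (Int × Int)) : Decidable (Spec_count_cycles_py s out) := by unfold Spec_count_cycles_py; infer_instance

-- ===== CLAIM (what is proved, stated in full; the proofs are below) =====
def Claim_equal_count_cycles_py : Prop := ∀ (s : List Int), Dom_count_cycles_py s → Spec_count_cycles_py s (count_cycles_py s)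

-- ===== LEMMAS AND PROOFS =====

-- zN s = the positions of the zeros of s, in increasing order
def zN : List Int → List Nat
  | [] => []
  | x :: t => (if x = 0 then [0] else []) ++ (zN t).map (· + 1)

-- consecutive pairs of a list
def pairsN : List Nat → List (Nat × Nat)
  | x :: y :: r => (x, y) :: pairsN (y :: r)
  | _ => []

-- the cycle strictly between a pair of zero positions
def chunk (s : List Int) (p : Nat × Nat) : List Int := (s.drop (p.1 + 1)).take (p.2 - (p.1 + 1))

-- concatenation of all cycles (what A's nested loops fold over)
def catC (s : List Int) : List Int := (pairsN (zN s)).flatMap (chunk s)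

-- the segment from the first zero to the last zero (what B's flat pass folds over)
def midC (s : List Int) : List Int := (s.drop ((zN s).headD 0)).take ((zN s).getLastD 0 - (zN s).headD 0)

-- the shared dict-counting step
def dstep (J : PySem.Dict Int Int) (v : Int) : PySem.Dict Int Int := J.insert v (J.getD v 0 + 1)

lemma pairsN_map_succ (l : List Nat) :
    pairsN (l.map (· + 1)) = (pairsN l).map (fun p => (p.1 + 1, p.2 + 1)) := by
  induction l with
  | nil => simp [pairsN]
  | cons x t ih =>
    cases t with
    | nil => simp [pairsN]
    | cons y r => simp [pairsN] at ih ⊢; exact ih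

lemma flatMap_chunk_cons (x : Int) (t : List Int) (l : List Nat) :
    ((pairsN l).map (fun p => (p.1 + 1, p.2 + 1))).flatMap (chunk (x :: t))
      = (pairsN l).flatMap (chunk t) := by
  rw [List.flatMap_map]
  apply List.flatMap_congr  -- guess name
  intro p _
  show chunk (x :: t) (p.1 + 1, p.2 + 1) = chunk t p
  simp only [chunk, List.drop_succ_cons]
  congr 1
  omega

lemma zN_mem_lt (s : List Int) : ∀ k ∈ zN s, k < s.length := by
  induction s with
  | nil => simp [zN]
  | cons x t ih =>
    intro k hk
    simp only [zN, List.mem_append, List.mem_map] at hk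
    rcases hk with h | ⟨a, ha, rfl⟩
    · split at h <;> simp_all
    · have := ih a ha; simp; omega

lemma zN_pairwise (s : List Int) : (zN s).Pairwise (· < ·) := by
  induction s with
  | nil => simp [zN]
  | cons x t ih =>
    simp only [zN]
    split
    · simp only [List.singleton_append, List.pairwise_cons]
      constructor
      · intro b hb; simp only [List.mem_map] at hb; omega
      · exact ih.map _ (by omega)
    · simpa using ih.map _ (by omega)

lemma getLastD_cons_cons (a b : Nat) (l : List Nat) (d : Nat) :
    (a :: b :: l).getLastD d = (b :: l).getLastD d := by
  simp [List.getLastD]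

lemma head_le_getLastD (z : Nat) (r : List Nat) (h : (z :: r).Pairwise (· < ·)) :
    z ≤ (z :: r).getLastD 0 := by
  have hmem : (z :: r).getLastD 0 ∈ z :: r := List.mem_of_getLast? rfl
  rcases List.mem_cons.mp hmem with h1 | h1
  · omega
  · have := (List.pairwise_cons.mp h).1 _ h1; omega

lemma getLastD_map_succ (z : Nat) (r : List Nat) :
    ((z :: r).map (· + 1)).getLastD 0 = (z :: r).getLastD 0 + 1 := by
  induction r generalizing z with
  | nil => simp
  | cons y r ih => simpa using ih y

lemma take_firstZero_no_zero (t : List Int) (z : Nat) (r : List Nat) (h : zN t = z :: r) :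
    ∀ v ∈ t.take z, ¬ v = 0 := by
  induction t generalizing z r with
  | nil => simp [zN] at h
  | cons x t ih =>
    by_cases hx : x = 0
    · simp [zN, hx] at h
      rcases h with ⟨rfl, _⟩
      simp
    · simp only [zN, if_neg hx, List.nil_append] at h
      rcases List.map_eq_cons_iff.mp h with ⟨z', r', hzt, hz, hr⟩
      subst hz
      intro v hv
      rw [List.take_succ_cons] at hv
      rcases List.mem_cons.mp hv with rfl | hv
      · exact hx
      · rcases List.map_eq_cons_iff.mp h with _
        exact ih z' r' (by rw [hzt]) v (by simpa [hzt] using hv)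

lemma catC_eq_filter_midC (s : List Int) :
    catC s = (midC s).filter (fun v => decide (v ≠ 0)) := by
  induction s with
  | nil => simp [catC, midC, zN, pairsN]
  | cons x t ih =>
    by_cases hx : x = 0
    · subst hx
      rcases hzt : zN t with _ | ⟨z, r⟩
      · simp [catC, midC, zN, hzt, pairsN]
      · have hzn : zN (0 :: t) = 0 :: (z :: r).map (· + 1) := by simp [zN, hzt]
        have hcat : catC (0 :: t) = t.take z ++ catC t := by
          rw [catC, hzn]
          have h1 : pairsN (0 :: (z :: r).map (· + 1)) = (0, z + 1) :: pairsN ((z :: r).map (· + 1)) := by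
            simp [pairsN]
          rw [h1, List.flatMap_cons, pairsN_map_succ, flatMap_chunk_cons,
            show chunk (0 :: t) (0, z + 1) = t.take z from by simp [chunk]]
          rw [catC, hzt]
        have hz_le : z ≤ (z :: r).getLastD 0 := head_le_getLastD z r (hzt ▸ zN_pairwise t)
        have hlast : (0 :: (z :: r).map (· + 1)).getLastD 0 = (z :: r).getLastD 0 + 1 := by
          rw [List.map_cons, getLastD_cons_cons]
          simpa using getLastD_map_succ z r
        have hmid : midC (0 :: t) = 0 :: t.take ((z :: r).getLastD 0) := by
          rw [midC, hzn, hlast, List.headD_cons, List.drop_zero, Nat.sub_zero, List.take_succ_cons]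
        rw [hcat, hmid, List.filter_cons, if_neg (by decide)]
        have hsplit : t.take ((z :: r).getLastD 0) = t.take z ++ (t.drop z).take ((z :: r).getLastD 0 - z) := by
          rw [← List.take_add]
          congr 1
          omega
        rw [hsplit, List.filter_append]
        congr 1
        · rw [List.filter_eq_self.mpr]
          intro v hv
          simpa using take_firstZero_no_zero t z r hzt v hv
        · rw [ih, show midC t = (t.drop z).take ((z :: r).getLastD 0 - z) from by simp [midC, hzt]]
    · have hzn : zN (x :: t) = (zN t).map (· + 1) := by simp [zN, hx]
      have hcat : catC (x :: t) = catC t := by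
        simp only [catC, hzn, pairsN_map_succ]
        exact flatMap_chunk_cons x t (zN t)
      rcases hzt : zN t with _ | ⟨z, r⟩
      · rw [hcat, ih]
        simp [midC, hzn, hzt]
      · have hlast : ((z + 1) :: r.map (· + 1)).getLastD 0 = (z :: r).getLastD 0 + 1 := by
          simpa using getLastD_map_succ z r
        have hmid : midC (x :: t) = midC t := by
          rw [midC, midC, hzn, hzt, List.map_cons, hlast, List.headD_cons, List.headD_cons,
            List.drop_succ_cons, Nat.succ_sub_succ]
        rw [hcat, ih, hmid]

lemma foldl_flat {α β : Type} (l : List α) (g : α → List Int) (f : β → Int → β) (init : β) :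
    l.foldl (fun J i => (g i).foldl f J) init = (l.flatMap g).foldl f init := by
  induction l generalizing init with
  | nil => rfl
  | cons a l ih => simp [List.flatMap_cons, List.foldl_append, ih]

lemma range_pairs (l : List Nat) (g : Nat × Nat → List Int) :
    (List.range (l.length - 1)).flatMap (fun k => g (l.getD k 0, l.getD (k + 1) 0))
      = (pairsN l).flatMap g := by
  rcases l with _ | ⟨x, t⟩
  · simp [pairsN]
  · induction t generalizing x with
    | nil => simp [pairsN]
    | cons y r ih =>
      have : (x :: y :: r).length - 1 = r.length + 1 := by simp
      rw [this, List.range_succ_eq_map, List.flatMap_cons, List.flatMap_map]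
      simp only [List.getD_cons_zero, List.getD_cons_succ]
      rw [pairsN, List.flatMap_cons]
      congr 1
      simpa using ih y

lemma zi_eq_zN (s : List Int) (m : Int) :
    ((PySem.List.enumerate s m).filter (fun p => p.2 == 0)).map (fun p => p.1)
      = (zN s).map (fun k : Nat => m + (k : Int)) := by
  induction s generalizing m with
  | nil => simp [PySem.List.enumerate_nil, zN]
  | cons x t ih =>
    rw [PySem.List.enumerate_cons, List.filter_cons]
    by_cases hx : x = 0
    · subst hx
      rw [if_pos (by simp)]
      have hz : zN ((0 : Int) :: t) = 0 :: (zN t).map (· + 1) := by simp [zN]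
      rw [hz, List.map_cons, List.map_cons, List.map_map, ih]
      congr 1
      · simp
      · apply List.map_congr_left
        intro k _
        simp only [Function.comp_apply]
        push_cast
        ring
    · rw [if_neg (by simp [hx])]
      have hz : zN (x :: t) = (zN t).map (· + 1) := by simp [zN, hx]
      rw [hz, List.map_map, ih]
      apply List.map_congr_left
      intro k _
      simp only [Function.comp_apply]
      push_cast
      ring

lemma index?_zN (s : List Int) : PySem.List.index? s 0 = (zN s).head? := by
  induction s with
  | nil => simp [PySem.List.index?, zN]
  | cons x t ih =>
    by_cases hx : x = 0
    · subst hx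
      rw [PySem.List.index?_cons_self]
      simp [zN]
    · rw [PySem.List.index?_cons_of_ne _ hx, ih]
      simp [zN, hx, List.head?_map]

lemma zN_append_singleton (l : List Int) (x : Int) :
    zN (l ++ [x]) = zN l ++ (if x = 0 then [l.length] else []) := by
  induction l with
  | nil => by_cases hx : x = 0 <;> simp [zN, hx]
  | cons y t ih =>
    simp only [List.cons_append, zN, ih, List.map_append]
    by_cases hx : x = 0 <;> simp [hx]

lemma zN_reverse (s : List Int) :
    zN s.reverse = ((zN s).map (fun k => s.length - 1 - k)).reverse := by
  induction s with
  | nil => simp [zN]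
  | cons x t ih =>
    rw [List.reverse_cons, zN_append_singleton, ih]
    by_cases hx : x = 0
    · subst hx
      rw [if_pos rfl]
      have hz : zN ((0 : Int) :: t) = 0 :: (zN t).map (· + 1) := by simp [zN]
      rw [hz, List.map_cons, List.map_map, List.reverse_cons]
      congr 1
      · congr 1
        apply List.map_congr_left
        intro k _
        simp only [Function.comp_apply, List.length_cons]
        omega
      · simp
    · rw [if_neg hx, List.append_nil]
      have hz : zN (x :: t) = (zN t).map (· + 1) := by simp [zN, hx]
      rw [hz, List.map_map]
      congr 1
      apply List.map_congr_left
      intro k _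
      simp only [Function.comp_apply, List.length_cons]
      omega

lemma portA_catC (s : List Int) :
    count_cycles_py s = ((catC s).foldl dstep PySem.Dict.empty).items := by
  have hzi : ((PySem.List.enumerate s 0).filter (fun p => p.2 == 0)).map (fun p => p.1)
      = (zN s).map (fun k : Nat => (k : Int)) := by
    rw [zi_eq_zN]
    apply List.map_congr_left
    intro k _
    simp
  rw [count_cycles_py]
  simp only [hzi]
  rcases hlen : (zN s).length with _ | n
  · rw [show ((((zN s).map (fun k : Nat => (k : Int))).length : Int) - 1 = -1) from by
      rw [List.length_map, hlen]; rfl]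
    rw [PySem.List.pyRange_one_eq_nil (by norm_num)]
    rw [show catC s = [] from by
      simp only [catC]
      rw [List.length_eq_zero_iff.mp hlen]
      rfl]
    rfl
  · have hcast : ((((zN s).map (fun k : Nat => (k : Int))).length : Int) - 1 = ((n : Nat) : Int)) := by
      rw [List.length_map, hlen]
      omega
    rw [hcast, PySem.List.pyRange_one, Int.sub_zero, Int.toNat_natCast, List.foldl_map]
    rw [PySem.List.foldl_congr_mem _ _
      (fun (J : PySem.Dict Int Int) (k : Nat) =>
        (chunk s ((zN s).getD k 0, (zN s).getD (k + 1) 0)).foldl dstep J) _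
      (by
        intro J k hk
        have hk' : k < n := List.mem_range.mp hk
        have hkl : k < (zN s).length := by omega
        have hkl1 : k + 1 < (zN s).length := by omega
        have e1 : PySem.List.pyGetD ((zN s).map (fun k : Nat => (k : Int))) ((0 : Int) + (k : Int)) 0
            = (((zN s).getD k 0 : Nat) : Int) := by
          rw [zero_add, PySem.List.pyGetD_natCast,
            List.getD_eq_getElem _ _ (by simpa using hkl), List.getElem_map,
            List.getD_eq_getElem _ _ hkl]
        have e2 : PySem.List.pyGetD ((zN s).map (fun k : Nat => (k : Int))) ((0 : Int) + (k : Int) + 1) 0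
            = (((zN s).getD (k + 1) 0 : Nat) : Int) := by
          rw [show (0 : Int) + (k : Int) + 1 = ((k + 1 : Nat) : Int) from by push_cast; ring,
            PySem.List.pyGetD_natCast,
            List.getD_eq_getElem _ _ (by simpa using hkl1), List.getElem_map,
            List.getD_eq_getElem _ _ hkl1]
        simp only [e1, e2]
        rw [show (((zN s).getD k 0 : Nat) : Int) + 1 = (((zN s).getD k 0 + 1 : Nat) : Int) from by
          push_cast; ring, PySem.List.slice_natCast]
        rfl)]
    rw [foldl_flat]
    rw [show List.range n = List.range ((zN s).length - 1) from by rw [hlen]; rfl]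
    rw [range_pairs]
    rfl

lemma portB_midC (s : List Int) :
    count_cycles_py_alt s
      = (((midC s).filter (fun v => decide (v ≠ 0))).foldl dstep PySem.Dict.empty).items := by
  rw [count_cycles_py_alt]
  rcases hzs : zN s with _ | ⟨z0, r⟩
  · rw [index?_zN, hzs]
    rw [show midC s = [] from by simp [midC, hzs]]
    rfl
  · rw [index?_zN, hzs]
    simp only [List.head?_cons]
    set L : Nat := (z0 :: r).getLastD 0 with hL
    have hLlast : (zN s).getLast? = some L := by
      rw [hzs, hL, List.getLastD_eq_getLast?]
      cases h : (z0 :: r).getLast? with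
      | none => simp [List.getLast?_eq_none_iff] at h
      | some a => rfl
    have hLmem : L ∈ zN s := List.mem_of_getLast? hLlast
    have hLlt : L < s.length := zN_mem_lt s L hLmem
    have hrev : PySem.List.index? ((PySem.List.slice? s none none (-1)).getD []) 0
        = some (s.length - 1 - L) := by
      rw [PySem.List.slice?_none_none_neg_one, Option.getD_some, index?_zN, zN_reverse,
        List.head?_reverse, List.getLast?_map, hLlast, Option.map_some]
    rw [hrev, Option.getD_some]
    have hlast : (s.length : Int) - 1 - ((s.length - 1 - L : Nat) : Int) = ((L : Nat) : Int) := by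
      omega
    rw [hlast]
    have hz0 : z0 ≤ L := head_le_getLastD z0 r (hzs ▸ zN_pairwise s)
    rw [PySem.List.slice_natCast]
    rw [show (L - z0 : Nat) = L - z0 from rfl]
    rw [show List.take (L - z0) (List.drop z0 s) = midC s from by
      simp [midC, hzs, hL]]
    rw [PySem.List.foldl_ite_eq_foldl_filter (p := fun v : Int => v ≠ 0)
      (f := fun (J : PySem.Dict Int Int) v => J.insert v (J.getD v 0 + 1))]
    rfl

-- ===== VERDICT (by name: the statement is the Claim_ definition above) =====
theorem count_cycles_py_spec : Claim_equal_count_cycles_py := by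
  intro s _
  show count_cycles_py s = count_cycles_py_alt s
  rw [portA_catC, portB_midC, catC_eq_filter_midC]
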